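-- pv_equiv track=rewrite | github.com/iminlan/Yandex-Algorithm-training | contest 1/details.py | master
-- ===== SOURCE A (Python) =====
-- def master(n, k, m):
--     if n < k or k < m:
--         return 0
--     else:
--         zag = n // k                                # сколько заготовок получилось из массы металла
--         izd = zag * (k // m)                        # сколько деталей получилось из этих заготовок
--         delta = zag * k - izd * m                   # сколько обрезков металла осталось
--         n = n % k + delta                           # считаем сколько со всех заготовок остаток + металл остался
--         return izd + master(n, k, m)
-- ===== SOURCE B (Python) =====
-- def master(n, k, m):
--     # Closed form: each blank consumes k metal and returns k - (k//m)*m scrap,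
--     # so the net metal spent per blank is (k//m)*m; count all blanks at once.
--     if n < k or k < m:
--         return 0
--     p = k // m          # parts per blank
--     net = p * m         # net metal consumed per blank
--     return p * ((n - k) // net + 1)
-- ===== Notes on version B (the rewrite author's own statement) =====
-- stated objective: alternative
-- what changed: Replaces A's recursive step-by-step simulation (make blanks, recycle scraps, recurse) by an O(1) closed form: parts-per-blank times the total number of blanks, computed from the net metal consumed per blank.
-- outside the precondition, e.g. on master(10, 3, -2): A returns -6, B returns -4
import Mathlib
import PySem

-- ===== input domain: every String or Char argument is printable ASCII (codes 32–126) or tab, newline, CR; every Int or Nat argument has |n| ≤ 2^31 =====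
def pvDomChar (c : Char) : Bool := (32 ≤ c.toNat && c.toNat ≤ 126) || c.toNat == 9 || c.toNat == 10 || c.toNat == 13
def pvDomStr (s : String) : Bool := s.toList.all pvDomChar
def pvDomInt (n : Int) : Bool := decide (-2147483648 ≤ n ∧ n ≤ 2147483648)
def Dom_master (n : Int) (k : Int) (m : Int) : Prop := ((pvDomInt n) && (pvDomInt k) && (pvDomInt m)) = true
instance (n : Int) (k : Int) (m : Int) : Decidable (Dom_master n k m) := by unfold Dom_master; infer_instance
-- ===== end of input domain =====

-- B replaces A's recursive recycle-and-recurse simulation by a closed form: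
-- parts per blank times the number of blanks, from the net metal cost per blank.

-- ===== PORT A =====
-- Literal transliteration of A's recursion; the Nat fuel only makes the
-- recursion total (inside Pre_master the mass n strictly decreases each
-- recursive step, so fuel n.toNat + 1 is never exhausted).
def masterFuel (fuel : Nat) (n : Int) (k : Int) (m : Int) : Int :=
  match fuel with
  | 0 => 0
  | fuel + 1 =>
    if n < k ∨ k < m then 0
    else
      let zag := PySem.Int.floordiv n k
      let izd := zag * (PySem.Int.floordiv k m)
      let delta := zag * k - izd * m
      let n' := PySem.Int.mod n k + delta
      izd + masterFuel fuel n' k m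

def master (n : Int) (k : Int) (m : Int) : Int :=
  masterFuel (n.toNat + 1) n k m

-- ===== PORT B =====
def master_alt (n : Int) (k : Int) (m : Int) : Int :=
  if n < k ∨ k < m then 0
  else
    let p := PySem.Int.floordiv k m
    let net := p * m
    p * (PySem.Int.floordiv (n - k) net + 1)

-- ===== PRECONDITION & SPEC =====
-- Pre_ excludes (a) the inputs where the Python A does not return (k = 0 divides,
-- or k < 0 where the recursion never reaches its base case), and (b) negative
-- part mass m (with k ≥ 1 and n ≥ k), outside the problem's natural domain,
-- where A's floor divisions yield a meaningless negative part count.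
def Pre_master (n : Int) (k : Int) (m : Int) : Prop :=
  n < k ∨ k < m ∨ (1 ≤ k ∧ 1 ≤ m)
instance (n : Int) (k : Int) (m : Int) : Decidable (Pre_master n k m) := by
  unfold Pre_master; infer_instance
def pvWitness_master : Int × Int × Int := (100, 7, 3)

def Spec_master (n : Int) (k : Int) (m : Int) (out : Int) : Prop := out = master_alt n k m
instance (n : Int) (k : Int) (m : Int) (out : Int) : Decidable (Spec_master n k m out) := by unfold Spec_master; infer_instance

-- ===== CLAIM (what is proved, stated in full; the proofs are below) =====
def Claim_equal_master : Prop := ∀ (n : Int) (k : Int) (m : Int), Dom_master n k m → Pre_master n k m → Spec_master n k m (master n k m)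

-- ===== LEMMAS AND PROOFS =====

-- With 1 ≤ m ≤ k, A's recursion computes B's closed form, for any sufficient fuel.
theorem fuel_eq_closed (k m : Int) (hk : 1 ≤ k) (hm : 1 ≤ m) (hmk : m ≤ k) :
    ∀ (fuel : Nat) (n : Int), n.toNat < fuel →
      masterFuel fuel n k m = master_alt n k m := by
  intro fuel
  induction fuel with
  | zero => intro n h; omega
  | succ f ih =>
    intro n hfuel
    by_cases hnk : n < k
    · simp [masterFuel, master_alt, if_pos (Or.inl hnk)]
    · have hkm : ¬ k < m := not_lt.mpr hmk
      have hguard : ¬ (n < k ∨ k < m) := by tauto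
      have hm0 : (0:Int) < m := by omega
      have hk0 : (0:Int) < k := by omega
      set p := PySem.Int.floordiv k m with hp
      set zag := PySem.Int.floordiv n k with hzag
      have hp1 : 1 ≤ p := by
        rw [hp, PySem.Int.le_floordiv_iff_mul_le hm0]; linarith
      have hpm_le : p * m ≤ k := by
        have h1 := PySem.Int.floordiv_mul_add_mod k m
        have h2 := PySem.Int.mod_nonneg k hm0
        rw [← hp] at h1; linarith
      have hnet1 : (1:Int) ≤ p * m := by nlinarith
      have hz1 : 1 ≤ zag := by
        rw [hzag, PySem.Int.le_floordiv_iff_mul_le hk0]; linarith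
      have hzbounds : zag * k ≤ n ∧ n < (zag + 1) * k := by
        have := (PySem.Int.floordiv_eq_iff_of_pos hk0 (a := n) (q := zag)).mp hzag.symm
        exact this
      have hmodn : PySem.Int.mod n k = n - zag * k := by
        have h1 := PySem.Int.floordiv_mul_add_mod n k
        rw [← hzag] at h1; linarith
      -- the recursive argument is n - zag * (p * m)
      have hn' : PySem.Int.mod n k + (zag * k - zag * p * m) = n - zag * (p * m) := by
        rw [hmodn]; ring
      have hdec : (n - zag * (p * m)).toNat < f := by
        have h1 : zag * (p * m) ≥ 1 := by nlinarith
        have h2 : 1 ≤ n := by omega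
        omega
      have ihx := ih (n - zag * (p * m)) hdec
      simp only [masterFuel, if_neg hguard, ← hp, ← hzag, hn', ihx]
      -- now compare zag * p + master_alt (n - zag*(p*m)) with master_alt n
      by_cases hrest : n - zag * (p * m) < k
      · -- last batch: closed form counts exactly zag blanks
        have hfl : PySem.Int.floordiv (n - k) (p * m) = zag - 1 := by
          rw [PySem.Int.floordiv_eq_iff_of_pos (by omega)]
          constructor
          · have h3 : (zag - 1) * (p * m) ≤ (zag - 1) * k :=
              mul_le_mul_of_nonneg_left hpm_le (by omega)
            nlinarith [hzbounds.1]
          · nlinarith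
        simp only [master_alt, if_pos (Or.inl hrest), if_neg hguard, ← hp, hfl]
        ring
      · have hguard' : ¬ (n - zag * (p * m) < k ∨ k < m) := by tauto
        set q := PySem.Int.floordiv (n - zag * (p * m) - k) (p * m) with hq
        have hqb := (PySem.Int.floordiv_eq_iff_of_pos (by omega : (0:Int) < p * m)
          (a := n - zag * (p * m) - k) (q := q)).mp hq.symm
        have hfl : PySem.Int.floordiv (n - k) (p * m) = zag + q := by
          rw [PySem.Int.floordiv_eq_iff_of_pos (by omega)]
          constructor
          · nlinarith [hqb.1]
          · nlinarith [hqb.2]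
        simp only [master_alt, if_neg hguard, if_neg hguard', ← hp, ← hq, hfl]
        ring

-- ===== VERDICT (by name: the statement is the Claim_ definition above) =====
theorem master_spec : Claim_equal_master := by
  intro n k m _ hpre
  unfold Spec_master master
  by_cases hnk : n < k
  · simp [masterFuel, master_alt, if_pos (Or.inl hnk)]
  · by_cases hkm : k < m
    · simp [masterFuel, master_alt, if_pos (Or.inr hkm)]
    · rcases hpre with h | h | ⟨hk, hm⟩
      · exact absurd h hnk
      · exact absurd h hkm
      · exact fuel_eq_closed k m hk hm (not_lt.mp hkm) (n.toNat + 1) n (by omega)
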